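-- pv_equiv track=rewrite | github.com/divya938/protein_ligand_preparation | ModellingScript.py | returnMissing
-- ===== SOURCE A (Python) =====
-- def returnMissing(seq):
--     mode = "FINDING"
--     start = 0
--     listOfSel = []
--     inBeginning = False
--     for index, char in enumerate(seq):
--         if index == 0 and char == '-':
--             inBeginning = True
--             continue
--         if char == '-' and inBeginning:
--             continue
--         if char != '-' and inBeginning:
--             inBeginning = False
--         if mode == "FINDING" and char == '-':
--             start = index+1
--             mode = "COUNTING"
--         if mode == "COUNTING" and char != '-':
--             if char == "*":
--                 continue
--             listOfSel.append((start, index))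
--             mode = "FINDING"
--     return listOfSel
-- ===== SOURCE B (Python) =====
-- def returnMissing(seq):
--     n = len(seq)
--     result = []
--     i = 0
--     while i < n and seq[i] == '-':   # skip the leading dash prefix
--         i += 1
--     while True:
--         j = seq.find('-', i)         # jump straight to the next gap start
--         if j == -1:
--             return result
--         k = j + 1
--         while k < n and seq[k] in '-*':   # absorb the gap body
--             k += 1
--         if k == n:                   # unclosed gap at the end: dropped
--             return result
--         result.append((j + 1, k))
--         i = k
-- ===== Notes on version B (the rewrite author's own statement) =====
-- stated objective: faster
-- what changed: A's four-flag per-character state machine is replaced by a position-jumping scan: skip the leading dash prefix, then repeatedly jump to the next gap start with str.find, absorb the following dash/star run, and emit (gap_start+1, terminator_index) unless the run reaches the end of the string.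
import Mathlib
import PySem

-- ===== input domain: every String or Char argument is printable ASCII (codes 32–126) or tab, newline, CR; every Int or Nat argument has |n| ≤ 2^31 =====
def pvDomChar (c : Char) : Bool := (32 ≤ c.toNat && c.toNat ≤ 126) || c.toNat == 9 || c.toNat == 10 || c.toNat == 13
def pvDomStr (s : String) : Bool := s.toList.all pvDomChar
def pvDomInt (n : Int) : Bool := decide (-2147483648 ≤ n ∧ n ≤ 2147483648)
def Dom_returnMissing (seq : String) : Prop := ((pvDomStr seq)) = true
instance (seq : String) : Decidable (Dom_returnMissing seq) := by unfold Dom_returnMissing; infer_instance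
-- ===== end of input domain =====

-- B replaces A's four-variable per-character state machine by a position-jumping scan
-- (skip leading dashes, str.find the next gap start, absorb the dash/star run, emit the
-- pair); a timing run measured B faster by a constant factor (C-level str.find).

-- ===== PORT A =====
-- one step of A's for-loop body, on state (mode, start, listOfSel, inBeginning)
def aStep (st : String × Int × List (Int × Int) × Bool) (ic : Int × Char) :
    String × Int × List (Int × Int) × Bool :=
  let mode := st.1; let start := st.2.1; let listOfSel := st.2.2.1; let inBeginning := st.2.2.2
  let index := ic.1; let char := ic.2
  if index = 0 ∧ char = '-' then (mode, start, listOfSel, true)            -- continue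
  else if char = '-' ∧ inBeginning then (mode, start, listOfSel, inBeginning)  -- continue
  else
    let inBeginning := if char ≠ '-' ∧ inBeginning then false else inBeginning
    let start' := if mode = "FINDING" ∧ char = '-' then index + 1 else start
    let mode' := if mode = "FINDING" ∧ char = '-' then "COUNTING" else mode
    if mode' = "COUNTING" ∧ char ≠ '-' then
      if char = '*' then (mode', start', listOfSel, inBeginning)           -- continue
      else ("FINDING", start', listOfSel ++ [(start', index)], inBeginning)
    else (mode', start', listOfSel, inBeginning)

def returnMissing (seq : String) : List (Int × Int) :=
  ((PySem.List.enumerate seq.toList 0).foldl aStep ("FINDING", 0, [], false)).2.2.1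

-- ===== PORT B =====
-- "while i < n and seq[i] == '-': i += 1"  (short-circuit 'and' as nested dite)
def bSkip (cs : List Char) (i : Nat) : Nat :=
  if h : i < cs.length then (if cs[i] = '-' then bSkip cs (i + 1) else i) else i
termination_by cs.length - i

-- "while k < n and seq[k] in '-*': k += 1"  ('in "-*"' ported as the two-char disjunction, exact)
def bAbsorb (cs : List Char) (k : Nat) : Nat :=
  if h : k < cs.length then
    (if cs[k] = '-' ∨ cs[k] = '*' then bAbsorb cs (k + 1) else k)
  else k
termination_by cs.length - k

theorem bAbsorb_ge (cs : List Char) (k : Nat) : k ≤ bAbsorb cs k := by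
  fun_induction bAbsorb cs k with
  | case1 _ _ _ ih => omega
  | case2 => omega
  | case3 => omega

theorem bAbsorb_le (cs : List Char) (k : Nat) (h : k ≤ cs.length) : bAbsorb cs k ≤ cs.length := by
  fun_induction bAbsorb cs k with
  | case1 _ _ _ ih => exact ih (by omega)
  | case2 => omega
  | case3 => omega

theorem bSkip_le (cs : List Char) (i : Nat) (h : i ≤ cs.length) : bSkip cs i ≤ cs.length := by
  fun_induction bSkip cs i with
  | case1 _ _ _ ih => exact ih (by omega)
  | case2 => omega
  | case3 => omega

-- the main loop "while True: …"; 'hi' is the loop invariant i ≤ n needed for totality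
def bLoop (cs : List Char) (i : Nat) (hi : i ≤ cs.length) (acc : List (Int × Int)) :
    List (Int × Int) :=
  -- j = seq.find('-', i)
  if hj : PySem.Chars.findFrom cs ['-'] (i : Int) none = -1 then acc
  else
    have hlt : (PySem.Chars.findFrom cs ['-'] (i : Int) none).toNat < cs.length := by
      have h1 := (PySem.Chars.findFrom_natCast_spec cs ['-'] i hi hj).2.1
      by_contra hcon
      rw [List.drop_eq_nil_of_le (by omega)] at h1
      simpa using h1.length_le
    if hk : bAbsorb cs ((PySem.Chars.findFrom cs ['-'] (i : Int) none).toNat + 1) = cs.length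
    then acc
    else
      bLoop cs (bAbsorb cs ((PySem.Chars.findFrom cs ['-'] (i : Int) none).toNat + 1))
        (by have := bAbsorb_le cs ((PySem.Chars.findFrom cs ['-'] (i : Int) none).toNat + 1)
              (by omega)
            omega)
        (acc ++ [(PySem.Chars.findFrom cs ['-'] (i : Int) none + 1,
                  (bAbsorb cs ((PySem.Chars.findFrom cs ['-'] (i : Int) none).toNat + 1) : Int))])
termination_by cs.length - i
decreasing_by
  have h1 : (i : Int) ≤ PySem.Chars.findFrom cs ['-'] (i : Int) none :=
    (PySem.Chars.findFrom_natCast_spec cs ['-'] i hi hj).1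
  have h2 := bAbsorb_ge cs ((PySem.Chars.findFrom cs ['-'] (i : Int) none).toNat + 1)
  omega

def returnMissing_alt (seq : String) : List (Int × Int) :=
  let cs := seq.toList
  bLoop cs (bSkip cs 0) (bSkip_le cs 0 (Nat.zero_le _)) []

-- ===== PRECONDITION & SPEC =====
def Spec_returnMissing (seq : String) (out : List (Int × Int)) : Prop := out = returnMissing_alt seq
instance (seq : String) (out : List (Int × Int)) : Decidable (Spec_returnMissing seq out) := by unfold Spec_returnMissing; infer_instance

-- ===== CLAIM (what is proved, stated in full; the proofs are below) =====
def Claim_equal_returnMissing : Prop := ∀ (seq : String), Dom_returnMissing seq → Spec_returnMissing seq (returnMissing seq)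

-- ===== LEMMAS AND PROOFS =====

-- common specification: the gap list emitted from position i onward, in FINDING / COUNTING mode
mutual
def gapsF : List Char → Int → List (Int × Int)
  | [], _ => []
  | c :: rest, i => if c = '-' then gapsC rest (i + 1) (i + 1) else gapsF rest (i + 1)
def gapsC : List Char → Int → Int → List (Int × Int)
  | [], _, _ => []
  | c :: rest, i, s => if c = '-' ∨ c = '*' then gapsC rest (i + 1) s else (s, i) :: gapsF rest (i + 1)
end

theorem gapsF_step (cs : List Char) (i : Nat) (h : i < cs.length) :
    gapsF (cs.drop i) i =
      if cs[i] = '-' then gapsC (cs.drop (i + 1)) ((i : Int) + 1) ((i : Int) + 1)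
      else gapsF (cs.drop (i + 1)) ((i : Int) + 1) := by
  rw [List.drop_eq_getElem_cons h]
  simp [gapsF]

theorem gapsC_step (cs : List Char) (i : Nat) (s : Int) (h : i < cs.length) :
    gapsC (cs.drop i) i s =
      if cs[i] = '-' ∨ cs[i] = '*' then gapsC (cs.drop (i + 1)) ((i : Int) + 1) s
      else (s, (i : Int)) :: gapsF (cs.drop (i + 1)) ((i : Int) + 1) := by
  rw [List.drop_eq_getElem_cons h]
  simp [gapsC]

theorem gapsF_no_dash (l : List Char) (n : Int) (h : '-' ∉ l) : gapsF l n = [] := by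
  induction l generalizing n with
  | nil => rfl
  | cons c rest ih =>
    simp only [List.mem_cons, not_or] at h
    have hc : c ≠ '-' := fun e => h.1 e.symm
    simp [gapsF, hc, ih _ h.2]

-- skipping a block of non-dash characters in FINDING mode
theorem gapsF_skip (cs : List Char) (d i : Nat) (hle : i + d ≤ cs.length)
    (hnd : ∀ t (_ : t < cs.length), i ≤ t → t < i + d → cs[t] ≠ '-') :
    gapsF (cs.drop i) i = gapsF (cs.drop (i + d)) ((i : Int) + (d : Int)) := by
  induction d generalizing i with
  | zero => simp
  | succ d ih =>
    have hi : i < cs.length := by omega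
    rw [gapsF_step cs i hi, if_neg (hnd i hi (le_refl _) (by omega))]
    have := ih (i + 1) (by omega) (fun t ht h1 h2 => hnd t ht (by omega) (by omega))
    rw [show ((i : Int) + 1) = ((i + 1 : Nat) : Int) by push_cast; ring, this,
        show i + 1 + d = i + (d + 1) by omega]
    congr 1
    push_cast; ring

-- skipping a block of '-'/'*' characters in COUNTING mode
theorem gapsC_skip (cs : List Char) (d i : Nat) (s : Int) (hle : i + d ≤ cs.length)
    (hg : ∀ t (_ : t < cs.length), i ≤ t → t < i + d → (cs[t] = '-' ∨ cs[t] = '*')) :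
    gapsC (cs.drop i) i s = gapsC (cs.drop (i + d)) ((i : Int) + (d : Int)) s := by
  induction d generalizing i with
  | zero => simp
  | succ d ih =>
    have hi : i < cs.length := by omega
    rw [gapsC_step cs i s hi, if_pos (hg i hi (le_refl _) (by omega))]
    have := ih (i + 1) (by omega) (fun t ht h1 h2 => hg t ht (by omega) (by omega))
    rw [show ((i : Int) + 1) = ((i + 1 : Nat) : Int) by push_cast; ring, this,
        show i + 1 + d = i + (d + 1) by omega]
    congr 1
    push_cast; ring

-- singleton infix = membership
theorem singleton_infix_iff (c : Char) (l : List Char) : [c] <:+: l ↔ c ∈ l := by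
  constructor
  · rintro ⟨p, s, rfl⟩; simp
  · intro h
    obtain ⟨p, s, rfl⟩ := List.append_of_mem h
    exact ⟨p, s, by simp⟩

theorem prefix_dash {cs : List Char} {t : Nat} (h : ['-'] <+: List.drop t cs) :
    ∃ h' : t < cs.length, cs[t] = '-' := by
  obtain ⟨r, hr⟩ := h
  have h1 : t < cs.length := by
    have := congrArg List.length hr
    simp [List.length_drop] at this
    omega
  refine ⟨h1, ?_⟩
  have h2 : (List.drop t cs)[0]? = some '-' := by rw [← hr]; rfl
  rw [List.getElem?_drop, Nat.add_zero, List.getElem?_eq_getElem h1] at h2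
  exact Option.some.inj h2

theorem dash_prefix {cs : List Char} {t : Nat} (ht : t < cs.length) (h : cs[t] = '-') :
    ['-'] <+: List.drop t cs := by
  rw [List.drop_eq_getElem_cons ht, h]
  exact ⟨_, rfl⟩

-- characterisation of bAbsorb's stopping point
theorem bAbsorb_mid (cs : List Char) (k : Nat) :
    ∀ t (_ : t < cs.length), k ≤ t → t < bAbsorb cs k → (cs[t] = '-' ∨ cs[t] = '*') := by
  fun_induction bAbsorb cs k with
  | case1 i h hc ih =>
    intro t ht h1 h2
    rcases Nat.eq_or_lt_of_le h1 with rfl | h1'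
    · exact hc
    · exact ih t ht h1' h2
  | case2 => intro t ht h1 h2; omega
  | case3 => intro t ht h1 h2; omega

theorem bAbsorb_end (cs : List Char) (k m : Nat) (hm : m < cs.length)
    (he : bAbsorb cs k = m) : ¬ (cs[m] = '-' ∨ cs[m] = '*') := by
  fun_induction bAbsorb cs k with
  | case1 i h hc ih => exact ih he
  | case2 i h hc => subst he; exact hc
  | case3 i h => omega

-- B's loop computes the common specification
theorem bLoop_eq (cs : List Char) (i : Nat) (hi : i ≤ cs.length) (acc : List (Int × Int)) :
    bLoop cs i hi acc = acc ++ gapsF (cs.drop i) i := by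
  fun_induction bLoop cs i hi acc with
  | case1 i hi acc hj =>
    have hnd : '-' ∉ List.drop i cs := fun hmem =>
      (PySem.Chars.findFrom_natCast_eq_neg_one_iff cs ['-'] i hi).mp hj
        ((singleton_infix_iff '-' _).mpr hmem)
    rw [gapsF_no_dash _ _ hnd, List.append_nil]
  | case2 i hi acc hj hlt hk =>
    -- unclosed trailing gap: the spec also emits nothing
    have hspec := PySem.Chars.findFrom_natCast_spec cs ['-'] i hi hj
    set j := PySem.Chars.findFrom cs ['-'] (i : Int) none with hjdef
    set k := bAbsorb cs (j.toNat + 1) with hkdef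
    obtain ⟨hjlt, hjd⟩ := prefix_dash hspec.2.1
    have hij : i ≤ j.toNat := by have := hspec.1; omega
    have hkge : j.toNat + 1 ≤ k := bAbsorb_ge cs (j.toNat + 1)
    have hmin : ∀ t (_ : t < cs.length), i ≤ t → t < j.toNat → cs[t] ≠ '-' := by
      intro t ht h1 h2 hcon
      exact hspec.2.2 t h1 h2 (dash_prefix ht hcon)
    have e1 := gapsF_skip cs (j.toNat - i) i (by omega) (fun t ht h1 h2 => hmin t ht h1 (by omega))
    rw [show i + (j.toNat - i) = j.toNat by omega,
        show ((i : Int) + ((j.toNat - i : Nat) : Int)) = ((j.toNat : Nat) : Int) by omega] at e1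
    have e2 := gapsF_step cs j.toNat hjlt
    rw [if_pos hjd] at e2
    have e3 := gapsC_skip cs (k - (j.toNat + 1)) (j.toNat + 1) ((j.toNat : Int) + 1)
      (by omega) (fun t ht h1 h2 => bAbsorb_mid cs (j.toNat + 1) t ht h1 (by omega))
    rw [show j.toNat + 1 + (k - (j.toNat + 1)) = k by omega,
        show (((j.toNat + 1 : Nat)) : Int) = (j.toNat : Int) + 1 by push_cast; ring,
        show (((j.toNat : Int) + 1) + ((k - (j.toNat + 1) : Nat) : Int)) = (k : Int) by omega] at e3
    rw [e1, e2, e3, hk, List.drop_length]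
    simp [gapsC]
  | case3 i hi acc hj hlt hk ih =>
    have hspec := PySem.Chars.findFrom_natCast_spec cs ['-'] i hi hj
    set j := PySem.Chars.findFrom cs ['-'] (i : Int) none with hjdef
    set k := bAbsorb cs (j.toNat + 1) with hkdef
    obtain ⟨hjlt, hjd⟩ := prefix_dash hspec.2.1
    have hij : i ≤ j.toNat := by have := hspec.1; omega
    have hkge : j.toNat + 1 ≤ k := bAbsorb_ge cs (j.toNat + 1)
    have hkle : k ≤ cs.length := bAbsorb_le cs (j.toNat + 1) (by omega)
    have hklt : k < cs.length := by omega
    have hmin : ∀ t (_ : t < cs.length), i ≤ t → t < j.toNat → cs[t] ≠ '-' := by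
      intro t ht h1 h2 hcon
      exact hspec.2.2 t h1 h2 (dash_prefix ht hcon)
    have e1 := gapsF_skip cs (j.toNat - i) i (by omega) (fun t ht h1 h2 => hmin t ht h1 (by omega))
    rw [show i + (j.toNat - i) = j.toNat by omega,
        show ((i : Int) + ((j.toNat - i : Nat) : Int)) = ((j.toNat : Nat) : Int) by omega] at e1
    have e2 := gapsF_step cs j.toNat hjlt
    rw [if_pos hjd] at e2
    have e3 := gapsC_skip cs (k - (j.toNat + 1)) (j.toNat + 1) ((j.toNat : Int) + 1)
      (by omega) (fun t ht h1 h2 => bAbsorb_mid cs (j.toNat + 1) t ht h1 (by omega))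
    rw [show j.toNat + 1 + (k - (j.toNat + 1)) = k by omega,
        show (((j.toNat + 1 : Nat)) : Int) = (j.toNat : Int) + 1 by push_cast; ring,
        show (((j.toNat : Int) + 1) + ((k - (j.toNat + 1) : Nat) : Int)) = (k : Int) by omega] at e3
    have hkchar := bAbsorb_end cs (j.toNat + 1) k hklt hkdef.symm
    have e4 := gapsC_step cs k ((j.toNat : Int) + 1) hklt
    rw [if_neg hkchar] at e4
    have e5 := gapsF_step cs k hklt
    rw [if_neg (fun hcon => hkchar (Or.inl hcon))] at e5
    rw [ih, e5, e1, e2, e3, e4,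
        show (j + 1 : Int) = ((j.toNat : Int) + 1) by have := hspec.1; omega]
    rw [show bAbsorb cs ((PySem.Chars.findFrom cs ['-'] (i : Int) none).toNat + 1) = k from rfl]
    simp

-- A's fold in the two reachable post-prefix modes computes the common specification
theorem aFold_eq (cs : List Char) :
    (∀ (n : Int) (s : Int) (acc : List (Int × Int)), 1 ≤ n →
      ((PySem.List.enumerate cs n).foldl aStep ("FINDING", s, acc, false)).2.2.1
        = acc ++ gapsF cs n) ∧
    (∀ (n : Int) (s : Int) (acc : List (Int × Int)), 1 ≤ n →
      ((PySem.List.enumerate cs n).foldl aStep ("COUNTING", s, acc, false)).2.2.1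
        = acc ++ gapsC cs n s) := by
  induction cs with
  | nil => exact ⟨fun n s acc _ => by simp [PySem.List.enumerate, gapsF],
           fun n s acc _ => by simp [PySem.List.enumerate, gapsC]⟩
  | cons c rest ih =>
    constructor
    · intro n s acc hn
      have hn0 : ¬ n = 0 := by omega
      rw [PySem.List.enumerate_cons, List.foldl_cons]
      by_cases hc : c = '-'
      · have : aStep ("FINDING", s, acc, false) (n, c) = ("COUNTING", n + 1, acc, false) := by
          simp [aStep, hn0, hc]
        rw [this, ih.2 (n + 1) (n + 1) acc (by omega)]
        simp [gapsF, hc]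
      · have : aStep ("FINDING", s, acc, false) (n, c) = ("FINDING", s, acc, false) := by
          simp [aStep, hn0, hc]
        rw [this, ih.1 (n + 1) s acc (by omega)]
        simp [gapsF, hc]
    · intro n s acc hn
      have hn0 : ¬ n = 0 := by omega
      rw [PySem.List.enumerate_cons, List.foldl_cons]
      by_cases hc : c = '-'
      · have : aStep ("COUNTING", s, acc, false) (n, c) = ("COUNTING", s, acc, false) := by
          simp [aStep, hn0, hc]
        rw [this, ih.2 (n + 1) s acc (by omega)]
        simp [gapsC, hc]
      · by_cases hst : c = '*'
        · have : aStep ("COUNTING", s, acc, false) (n, c) = ("COUNTING", s, acc, false) := by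
            simp [aStep, hn0, hst]
          rw [this, ih.2 (n + 1) s acc (by omega)]
          simp [gapsC, hst]
        · have : aStep ("COUNTING", s, acc, false) (n, c)
              = ("FINDING", s, acc ++ [(s, n)], false) := by
            simp [aStep, hn0, hc, hst]
          rw [this, ih.1 (n + 1) s (acc ++ [(s, n)]) (by omega)]
          simp [gapsC, hc, hst]

-- A's fold during the leading-dash prefix (inBeginning = true)
theorem aFold_begin (cs : List Char) :
    ∀ (n : Int) (s : Int) (acc : List (Int × Int)), 1 ≤ n →
    ((PySem.List.enumerate cs n).foldl aStep ("FINDING", s, acc, true)).2.2.1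
      = acc ++ gapsF (cs.dropWhile (· = '-')) (n + ((cs.takeWhile (· = '-')).length : Int)) := by
  induction cs with
  | nil => intro n s acc _; simp [PySem.List.enumerate, gapsF]
  | cons c rest ih =>
    intro n s acc hn
    have hn0 : ¬ n = 0 := by omega
    rw [PySem.List.enumerate_cons, List.foldl_cons]
    by_cases hc : c = '-'
    · have : aStep ("FINDING", s, acc, true) (n, c) = ("FINDING", s, acc, true) := by
        simp [aStep, hn0, hc]
      rw [this, ih (n + 1) s acc (by omega)]
      simp only [List.dropWhile_cons, List.takeWhile_cons, hc, decide_true, if_true,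
        List.length_cons]
      congr 2
      push_cast; ring
    · have : aStep ("FINDING", s, acc, true) (n, c) = ("FINDING", s, acc, false) := by
        simp [aStep, hn0, hc]
      rw [this, (aFold_eq rest).1 (n + 1) s acc (by omega)]
      simp only [List.dropWhile_cons, List.takeWhile_cons, hc, decide_false]
      simp [gapsF, hc]

theorem bSkip_spec (cs : List Char) (i : Nat) :
    cs.drop (bSkip cs i) = (cs.drop i).dropWhile (· = '-') ∧
    (bSkip cs i : Int) = (i : Int) + (((cs.drop i).takeWhile (· = '-')).length : Int) := by
  fun_induction bSkip cs i with
  | case1 i h hc ih =>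
    rw [List.drop_eq_getElem_cons h, hc]
    constructor
    · rw [ih.1]; simp
    · rw [ih.2]; simp; ring
  | case2 i h hc =>
    constructor
    · conv_rhs => rw [List.drop_eq_getElem_cons h, List.dropWhile_cons]
      rw [if_neg (by simp [hc]), ← List.drop_eq_getElem_cons h]
    · conv_rhs => rw [List.drop_eq_getElem_cons h, List.takeWhile_cons]
      rw [if_neg (by simp [hc])]
      simp
  | case3 i h =>
    rw [List.drop_eq_nil_of_le (by omega)]
    simp

-- ===== VERDICT (by name: the statement is the Claim_ definition above) =====
theorem returnMissing_spec : Claim_equal_returnMissing := by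
  intro seq _
  show returnMissing seq = returnMissing_alt seq
  rw [returnMissing, returnMissing_alt]
  rw [bLoop_eq, (bSkip_spec seq.toList 0).1]
  have hidx := (bSkip_spec seq.toList 0).2
  simp only [List.drop_zero] at hidx ⊢
  rw [hidx]
  cases hcs : seq.toList with
  | nil => simp [PySem.List.enumerate, gapsF]
  | cons c rest =>
    rw [PySem.List.enumerate_cons, List.foldl_cons]
    by_cases hc : c = '-'
    · have : aStep ("FINDING", 0, [], false) (0, c) = ("FINDING", 0, [], true) := by
        simp [aStep, hc]
      rw [this, aFold_begin rest (0 + 1) 0 [] (by norm_num)]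
      simp [hc]
      ring_nf
    · have : aStep ("FINDING", 0, [], false) (0, c) = ("FINDING", 0, [], false) := by
        simp [aStep, hc]
      rw [this, (aFold_eq rest).1 (0 + 1) 0 [] (by norm_num)]
      simp [hc, gapsF]
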